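-- pv_equiv track=rewrite | github.com/dandingdjianjiao/DES-system-design | src/agent/prompts/extraction_prompts.py | parse_extracted_memories
-- ===== SOURCE A (Python) =====
-- def parse_extracted_memories(llm_output: str) -> list:
--     """
--     Parse LLM output to extract memory items.
--
--     Expected format:
--     # Memory Item N
--     ## Title: ...
--     ## Description: ...
--     ## Content: ...
--
--     Args:
--         llm_output: Raw output from LLM
--
--     Returns:
--         List of dicts with keys: title, description, content
--     """
--     memories = []
--     lines = llm_output.strip().split('\n')
--
--     current_memory = {}
--     current_field = None
--
--     for line in lines:
--         line = line.strip()
--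
--         # Start of new memory item
--         if line.startswith('# Memory Item'):
--             if current_memory:
--                 memories.append(current_memory)
--             current_memory = {}
--             current_field = None
--
--         # Parse fields
--         elif line.startswith('## Title:'):
--             current_field = 'title'
--             current_memory['title'] = line.replace('## Title:', '').strip()
--
--         elif line.startswith('## Description:'):
--             current_field = 'description'
--             current_memory['description'] = line.replace('## Description:', '').strip()
--
--         elif line.startswith('## Content:'):
--             current_field = 'content'
--             current_memory['content'] = line.replace('## Content:', '').strip()
--
--         # Continue multi-line fields
--         elif line and current_field and not line.startswith('#'):
--             if current_field in current_memory:
--                 current_memory[current_field] += ' ' + line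
--
--     # Add last memory
--     if current_memory:
--         memories.append(current_memory)
--
--     return memories
-- ===== SOURCE B (Python) =====
-- def _parse_block(block_lines):
--     mem = {}
--     field = None
--     for line in block_lines:
--         if line.startswith('## Title:'):
--             field = 'title'
--             mem['title'] = line.replace('## Title:', '').strip()
--         elif line.startswith('## Description:'):
--             field = 'description'
--             mem['description'] = line.replace('## Description:', '').strip()
--         elif line.startswith('## Content:'):
--             field = 'content'
--             mem['content'] = line.replace('## Content:', '').strip()
--         elif line and field and not line.startswith('#'):
--             if field in mem:
--                 mem[field] += ' ' + line
--     return mem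
--
--
-- def parse_extracted_memories(llm_output: str) -> list:
--     """Partition the stripped lines into blocks cut at '# Memory Item' headers
--     (the pre-header chunk is a block too), parse each block independently and
--     keep the non-empty results."""
--     lines = [raw.strip() for raw in llm_output.strip().split('\n')]
--     blocks = []
--     current = []
--     for line in lines:
--         if line.startswith('# Memory Item'):
--             blocks.append(current)
--             current = []
--         else:
--             current.append(line)
--     blocks.append(current)
--     memories = []
--     for block in blocks:
--         mem = _parse_block(block)
--         if mem:
--             memories.append(mem)
--     return memories
-- ===== Notes on version B (the rewrite author's own statement) =====
-- stated objective: alternative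
-- what changed: B replaces A's single stateful pass (memories/current_memory/current_field threaded through every line) by a two-phase decomposition: partition the stripped lines into blocks cut at memory-item header lines, then parse each block independently with a stateless helper and keep the non-empty dicts.
import Mathlib
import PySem

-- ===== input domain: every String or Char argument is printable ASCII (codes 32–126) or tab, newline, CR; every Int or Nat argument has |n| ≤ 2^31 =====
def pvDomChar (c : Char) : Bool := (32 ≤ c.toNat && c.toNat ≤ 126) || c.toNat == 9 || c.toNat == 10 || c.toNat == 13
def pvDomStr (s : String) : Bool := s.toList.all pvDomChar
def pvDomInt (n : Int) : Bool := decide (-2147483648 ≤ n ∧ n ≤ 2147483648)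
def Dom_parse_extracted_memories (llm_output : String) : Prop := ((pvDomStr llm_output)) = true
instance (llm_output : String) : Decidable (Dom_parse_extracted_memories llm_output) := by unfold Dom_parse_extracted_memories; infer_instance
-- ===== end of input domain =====

-- B re-parses the same format by a different decomposition (split into header-cut blocks, then parse
-- each block independently) instead of A's single stateful pass; same cost, no speed claim.

-- ===== PORT A =====
-- the '## Title:'/'## Description:'/'## Content:'/continuation elif-chain; this code is verbatim
-- identical in Python A's loop body and in Python B's _parse_block helper, so both ports share it
def fieldStep (mem : PySem.Dict String String) (field : Option String) (line : String) :
    PySem.Dict String String × Option String :=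
  if PySem.Str.startswith line "## Title:" then
    (mem.insert "title" (PySem.Str.strip (PySem.Str.replace line "## Title:" "")), some "title")
  else if PySem.Str.startswith line "## Description:" then
    (mem.insert "description" (PySem.Str.strip (PySem.Str.replace line "## Description:" "")),
      some "description")
  else if PySem.Str.startswith line "## Content:" then
    (mem.insert "content" (PySem.Str.strip (PySem.Str.replace line "## Content:" "")), some "content")
  else
    match field with
    | none => (mem, none)
    | some f =>
      if line ≠ "" ∧ ¬ PySem.Str.startswith line "#" then
        if mem.contains f then (mem.modify f "" (fun v => v ++ " " ++ line), some f)
        else (mem, some f)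
      else (mem, some f)

-- A's for-loop: state (memories, current_memory, current_field); dicts recorded as .items lists
def loopA : List String → List (List (String × String)) → PySem.Dict String String → Option String →
    List (List (String × String)) × PySem.Dict String String
  | [], ms, mem, _ => (ms, mem)
  | raw :: ls, ms, mem, field =>
      let line := PySem.Str.strip raw
      if PySem.Str.startswith line "# Memory Item" then
        loopA ls (if mem.items = [] then ms else ms ++ [mem.items]) PySem.Dict.empty none
      else
        loopA ls ms (fieldStep mem field line).1 (fieldStep mem field line).2

def parse_extracted_memories (llm_output : String) : List (List (String × String)) :=
  let lines := (PySem.Str.split? (PySem.Str.strip llm_output) "\n").getD []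
  let r := loopA lines [] PySem.Dict.empty none
  if r.2.items = [] then r.1 else r.1 ++ [r.2.items]

-- ===== PORT B =====
-- _parse_block: fold the shared field chain over one block's lines from an empty dict
def pvParseBlock (block : List String) : PySem.Dict String String :=
  (block.foldl (fun st line => fieldStep st.1 st.2 line)
    ((PySem.Dict.empty : PySem.Dict String String), (none : Option String))).1

-- cut the stripped lines into blocks at every '# Memory Item' header
def pvSplitBlocks : List String → List (List String) → List String → List (List String)
  | [], bs, cur => bs ++ [cur]
  | line :: ls, bs, cur =>
      if PySem.Str.startswith line "# Memory Item" then pvSplitBlocks ls (bs ++ [cur]) []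
      else pvSplitBlocks ls bs (cur ++ [line])

-- keep the non-empty parsed blocks
def pvCollect : List (List String) → List (List (String × String)) → List (List (String × String))
  | [], acc => acc
  | b :: bs, acc =>
      pvCollect bs (if (pvParseBlock b).items = [] then acc else acc ++ [(pvParseBlock b).items])

def parse_extracted_memories_alt (llm_output : String) : List (List (String × String)) :=
  let lines := ((PySem.Str.split? (PySem.Str.strip llm_output) "\n").getD []).map PySem.Str.strip
  pvCollect (pvSplitBlocks lines [] []) []

-- ===== PRECONDITION & SPEC =====
def Spec_parse_extracted_memories (llm_output : String) (out : List (List (String × String))) : Prop := out = parse_extracted_memories_alt llm_output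
instance (llm_output : String) (out : List (List (String × String))) : Decidable (Spec_parse_extracted_memories llm_output out) := by unfold Spec_parse_extracted_memories; infer_instance

-- ===== CLAIM (what is proved, stated in full; the proofs are below) =====
def Claim_equal_parse_extracted_memories : Prop := ∀ (llm_output : String), Dom_parse_extracted_memories llm_output → Spec_parse_extracted_memories llm_output (parse_extracted_memories llm_output)

-- ===== LEMMAS AND PROOFS =====

-- common reference semantics: one pass over ALREADY-STRIPPED lines
def pvEmit (mem : PySem.Dict String String) : List (List (String × String)) :=
  if mem.items = [] then [] else [mem.items]

def pvRun : PySem.Dict String String → Option String → List String → List (List (String × String))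
  | mem, _, [] => pvEmit mem
  | mem, field, line :: ls =>
      if PySem.Str.startswith line "# Memory Item" then
        pvEmit mem ++ pvRun PySem.Dict.empty none ls
      else
        pvRun (fieldStep mem field line).1 (fieldStep mem field line).2 ls

-- the partial-block state after folding the field chain over cur
def pvState (cur : List String) : PySem.Dict String String × Option String :=
  cur.foldl (fun st line => fieldStep st.1 st.2 line)
    ((PySem.Dict.empty : PySem.Dict String String), (none : Option String))

lemma emit_append (ms : List (List (String × String))) (mem : PySem.Dict String String) :
    (if mem.items = [] then ms else ms ++ [mem.items]) = ms ++ pvEmit mem := by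
  unfold pvEmit; split_ifs <;> simp

lemma loopA_run (ls : List String) :
    ∀ (ms : List (List (String × String))) (mem : PySem.Dict String String) (field : Option String),
    (if (loopA ls ms mem field).2.items = [] then (loopA ls ms mem field).1
      else (loopA ls ms mem field).1 ++ [(loopA ls ms mem field).2.items])
    = ms ++ pvRun mem field (ls.map PySem.Str.strip) := by
  induction ls with
  | nil => intro ms mem field; simp [loopA, pvRun]; exact emit_append ms mem
  | cons raw ls ih =>
      intro ms mem field
      simp only [loopA, pvRun, List.map]
      by_cases h : PySem.Str.startswith (PySem.Str.strip raw) "# Memory Item" = true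
      · simp only [h, if_true, ih, emit_append, List.append_assoc]
      · simp only [h, Bool.false_eq_true, if_false, ih]

lemma collect_append_singleton (bs : List (List String)) :
    ∀ (acc : List (List (String × String))) (b : List String),
    pvCollect (bs ++ [b]) acc = pvCollect bs acc ++ pvEmit (pvParseBlock b) := by
  induction bs with
  | nil => intro acc b; simp [pvCollect, pvEmit]; split_ifs <;> simp
  | cons b' bs ih => intro acc b; simp only [List.cons_append, pvCollect, ih]

lemma splitBlocks_run (ls : List String) :
    ∀ (bs : List (List String)) (cur : List String),
    pvCollect (pvSplitBlocks ls bs cur) []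
      = pvCollect bs [] ++ pvRun (pvState cur).1 (pvState cur).2 ls := by
  induction ls with
  | nil =>
      intro bs cur
      simp only [pvSplitBlocks, pvRun, collect_append_singleton]
      rfl
  | cons line ls ih =>
      intro bs cur
      simp only [pvSplitBlocks, pvRun]
      by_cases h : PySem.Str.startswith line "# Memory Item" = true
      · simp only [h, if_true, ih, collect_append_singleton, List.append_assoc]
        rfl
      · simp only [h, Bool.false_eq_true, if_false, ih]
        have : pvState (cur ++ [line])
            = (fieldStep (pvState cur).1 (pvState cur).2 line) := by
          simp [pvState, List.foldl_append]
        rw [this]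

-- ===== VERDICT (by name: the statement is the Claim_ definition above) =====
theorem parse_extracted_memories_spec : Claim_equal_parse_extracted_memories := by
  intro s _
  show parse_extracted_memories s = parse_extracted_memories_alt s
  unfold parse_extracted_memories parse_extracted_memories_alt
  rw [loopA_run, splitBlocks_run]
  rfl
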